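-- pv_equiv track=rewrite | github.com/pushpa-info-14/python-programming | LeetCode/1000-1500/Q1415-The-k-th-Lexicographical-String-of-All-Happy-Strings-of-Length-n.py | getHappyString2
-- ===== SOURCE A (Python) =====
-- def getHappyString2(n: int, k: int) -> str:
--     total_happy = 3 * 2 ** (n - 1)
--
--     res = []
--     choices = "abc"
--     left, right = 1, total_happy
--
--     for i in range(n):
--         cur = left
--         partition_size = (right - left + 1) // len(choices)
--         # Polling: 1 - 4, 5 - 8, 9 - 12
--
--         for c in choices:
--             # cur <= k < cur + partition_size
--             if k in range(cur, cur + partition_size):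
--                 res.append(c)
--                 left = cur
--                 right = cur + partition_size - 1
--                 choices = "abc".replace(c, "")
--                 break
--             cur += partition_size
--     return "".join(res)
-- ===== SOURCE B (Python) =====
-- def getHappyString2(n: int, k: int) -> str:
--     # closed form: first char from (k-1) // 2**(n-1); each later char is picked
--     # by one binary digit of k-1 (bit t), no interval bookkeeping
--     if n < 1:
--         return ""
--     m = 2 ** (n - 1)
--     if k < 1 or k > 3 * m:
--         return ""
--     idx = k - 1
--     q = idx // m
--     prev = 'a' if q == 0 else ('b' if q == 1 else 'c')
--     res = [prev]
--     for t in range(n - 2, -1, -1):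
--         lo, hi = [c for c in "abc" if c != prev]
--         prev = hi if (idx >> t) & 1 else lo
--         res.append(prev)
--     return "".join(res)
-- ===== Notes on version B (the rewrite author's own statement) =====
-- stated objective: faster
-- what changed: A narrows an interval [left,right] over all 3*2^(n-1) ranks, updating big-integer bounds with an inner scan over the remaining choices each round; B is a closed-form digit decomposition: the first char is (k-1)//2^(n-1) and each further char is picked by one binary digit of k-1 ((idx>>t)&1), with no interval bookkeeping.
import Mathlib
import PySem

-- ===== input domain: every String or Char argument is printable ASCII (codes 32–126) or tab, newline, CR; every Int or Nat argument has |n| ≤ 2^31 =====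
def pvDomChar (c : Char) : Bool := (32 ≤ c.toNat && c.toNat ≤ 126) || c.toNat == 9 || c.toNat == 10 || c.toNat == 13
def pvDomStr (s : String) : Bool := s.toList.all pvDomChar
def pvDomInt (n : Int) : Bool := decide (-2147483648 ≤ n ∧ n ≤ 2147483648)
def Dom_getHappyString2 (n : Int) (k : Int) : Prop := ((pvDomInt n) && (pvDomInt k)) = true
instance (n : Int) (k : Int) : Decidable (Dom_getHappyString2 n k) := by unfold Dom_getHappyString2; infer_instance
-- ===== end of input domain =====

-- B replaces A's big-int interval-narrowing loop by a closed-form digit decomposition of k-1 (measured faster at scale).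

-- ===== PORT A =====
-- inner `for c in choices` loop: `k in range(cur, cur + partition_size)` picks the block, else cur += partition_size
def pickA : List Char → Int → Int → Int → Option (Char × Int × Int)
  | [], _, _, _ => none
  | c :: rest, cur, ps, k =>
    if cur ≤ k ∧ k < cur + ps then some (c, cur, cur + ps - 1)
    else pickA rest (cur + ps) ps k

-- outer `for i in range(n)` loop over the state (res, choices, left, right)
def loopA : Nat → List Char → List Char → Int → Int → Int → List Char
  | 0, res, _, _, _, _ => res
  | t + 1, res, choices, left, right, k =>
    match pickA choices left (PySem.Int.floordiv (right - left + 1) (choices.length : Int)) k with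
    | some (c, l, r) =>
        loopA t (res ++ [c]) (PySem.Str.replace "abc" (String.mk [c]) "").toList l r k
    | none => loopA t res choices left right k

-- For n ≤ 0 Python's `3 * 2 ** (n-1)` is a float, but `range(n)` is empty so the value is never
-- read; for n ≥ 1 it equals 3 * 2^(n-1), which is what we write ((n-1).toNat = n-1 there).
def getHappyString2 (n : Int) (k : Int) : String :=
  String.mk (loopA n.toNat [] "abc".toList 1 (3 * 2 ^ (n - 1).toNat) k)

-- ===== PORT B =====
-- the `for t in range(n - 2, -1, -1)` loop over state (prev, res): structural countdown on the
-- exponent t; each recursive step is one iteration, testing bit t of idx via `(idx >> t) & 1`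
def suffixB : Char → Int → Nat → List Char
  | _, _, 0 => []
  | prev, idx, t + 1 =>
    match "abc".toList.filter (· ≠ prev) with
    | lo :: hi :: _ =>
        (if PySem.Int.band (idx >>> t) 1 ≠ 0 then hi else lo) ::
          suffixB (if PySem.Int.band (idx >>> t) 1 ≠ 0 then hi else lo) idx t
    | _ => []  -- unreachable: the filter keeps exactly two of 'a','b','c'

def getHappyString2_alt (n : Int) (k : Int) : String :=
  if n < 1 then "" else
  if k < 1 ∨ k > 3 * 2 ^ (n - 1).toNat then "" else
  String.mk
    ((if PySem.Int.floordiv (k - 1) (2 ^ (n - 1).toNat) = 0 then 'a'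
      else if PySem.Int.floordiv (k - 1) (2 ^ (n - 1).toNat) = 1 then 'b' else 'c') ::
     suffixB
      (if PySem.Int.floordiv (k - 1) (2 ^ (n - 1).toNat) = 0 then 'a'
       else if PySem.Int.floordiv (k - 1) (2 ^ (n - 1).toNat) = 1 then 'b' else 'c')
      (k - 1) (n - 1).toNat)

-- ===== PRECONDITION & SPEC =====
def Spec_getHappyString2 (n : Int) (k : Int) (out : String) : Prop := out = getHappyString2_alt n k
instance (n : Int) (k : Int) (out : String) : Decidable (Spec_getHappyString2 n k out) := by unfold Spec_getHappyString2; infer_instance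

-- ===== CLAIM (what is proved, stated in full; the proofs are below) =====
def Claim_equal_getHappyString2 : Prop := ∀ (n : Int) (k : Int), Dom_getHappyString2 n k → Spec_getHappyString2 n k (getHappyString2 n k)

-- ===== LEMMAS AND PROOFS =====

lemma mod_succ_cases (m t : Nat) :
    (m % 2 ^ (t + 1) < 2 ^ t ∧ m % 2 ^ t = m % 2 ^ (t + 1)) ∨
    (2 ^ t ≤ m % 2 ^ (t + 1) ∧ m % 2 ^ t + 2 ^ t = m % 2 ^ (t + 1)) := by
  have h3 : m % 2 ^ (t + 1) = 2 ^ t * (m / 2 ^ t % 2) + m % 2 ^ t := by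
    rw [Nat.mod_pow_succ]; ring
  have h4 : m % 2 ^ t < 2 ^ t := Nat.mod_lt _ (by positivity)
  have h5 : m / 2 ^ t % 2 < 2 := Nat.mod_lt _ (by norm_num)
  set b := m / 2 ^ t % 2 with hbdef
  interval_cases b
  · left; omega
  · right; omega

-- Python's `(m >> t) & 1` is nonzero exactly when bit t of m is set
lemma bit_test (m t : Nat) :
    (PySem.Int.band ((m : Int) >>> t) 1 ≠ 0) ↔ 2 ^ t ≤ m % 2 ^ (t + 1) := by
  have h1 : ((m : Int) >>> t) = ((m >>> t : Nat) : Int) := by exact_mod_cast rfl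
  have h2 : ∀ a : Nat, PySem.Int.band ((a : Nat) : Int) 1 = ((a &&& 1 : Nat) : Int) := by
    intro a; simp [PySem.Int.band]
  rw [h1, h2, Nat.and_one_is_mod, Nat.shiftRight_eq_div_pow, ne_eq, Nat.cast_eq_zero]
  have h3 : m % 2 ^ (t + 1) = 2 ^ t * (m / 2 ^ t % 2) + m % 2 ^ t := by
    rw [Nat.mod_pow_succ]; ring
  have h4 : m % 2 ^ t < 2 ^ t := Nat.mod_lt _ (by positivity)
  have h5 : m / 2 ^ t % 2 < 2 := Nat.mod_lt _ (by norm_num)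
  set b := m / 2 ^ t % 2 with hbdef
  interval_cases b
  · simp; omega
  · simp; omega

-- k is in the block [left, left + 2^t) and k - left is the low t bits of m:
-- A's interval loop and B's digit recursion agree.
lemma loopA_suffix (t : Nat) : ∀ (prev : Char) (res : List Char) (left k : Int) (m : Nat),
    (prev = 'a' ∨ prev = 'b' ∨ prev = 'c') →
    left ≤ k → k < left + 2 ^ t → k - left = ((m % 2 ^ t : Nat) : Int) →
    loopA t res ((PySem.Str.replace "abc" (String.mk [prev]) "").toList) left (left + 2 ^ t - 1) k
      = res ++ suffixB prev (m : Int) t := by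
  induction t with
  | zero => intro prev res left k m _ _ _ _; simp [loopA, suffixB]
  | succ t ih =>
    intro prev res left k m hprev h1 h2 hinv
    have hpos : (0 : Int) < 2 ^ t := by positivity
    have hc : ((2 ^ t : Nat) : Int) = 2 ^ t := by push_cast; ring
    have hc1 : ((2 ^ (t + 1) : Nat) : Int) = 2 ^ (t + 1) := by push_cast; ring
    have hpow : (2 : Int) ^ (t + 1) = 2 ^ t + 2 ^ t := by ring
    have hcond := bit_test m t
    obtain ⟨lo, hi, hrep, hfil, hlo, hhi⟩ :
        ∃ lo hi, (PySem.Str.replace "abc" (String.mk [prev]) "").toList = [lo, hi] ∧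
          "abc".toList.filter (· ≠ prev) = [lo, hi] ∧
          (lo = 'a' ∨ lo = 'b' ∨ lo = 'c') ∧ (hi = 'a' ∨ hi = 'b' ∨ hi = 'c') := by
      rcases hprev with h | h | h <;> subst h
      · exact ⟨'b', 'c', by decide, by decide, by decide, by decide⟩
      · exact ⟨'a', 'c', by decide, by decide, by decide, by decide⟩
      · exact ⟨'a', 'b', by decide, by decide, by decide, by decide⟩
    rw [hrep]
    have hps : PySem.Int.floordiv (left + 2 ^ (t + 1) - 1 - left + 1) (((0 + 1 + 1 : Nat)) : Int)
        = (2 : Int) ^ t := by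
      have h : left + 2 ^ (t + 1) - 1 - left + 1 = 2 ^ t * 2 := by ring
      rw [h, PySem.Int.floordiv_eq_ediv_of_pos (by norm_num)]
      norm_num
    simp only [loopA, List.length_cons, List.length_nil]
    rw [hps]
    rcases mod_succ_cases m t with ⟨hlt, heq⟩ | ⟨hge, heq⟩
    · -- bit t of m is 0: A picks the first block, B picks lo
      have hb : k < left + 2 ^ t := by omega
      have hpick : pickA [lo, hi] left (2 ^ t) k = some (lo, left, left + 2 ^ t - 1) := by
        simp only [pickA]; rw [if_pos ⟨h1, hb⟩]
      rw [hpick]; dsimp only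
      rw [ih lo (res ++ [lo]) left k m hlo h1 hb (by omega)]
      simp only [suffixB, hfil]
      rw [if_neg (by rw [hcond]; omega)]
      simp
    · -- bit t of m is 1: A picks the second block, B picks hi
      have hb1 : left + 2 ^ t ≤ k := by omega
      have hpick : pickA [lo, hi] left (2 ^ t) k
          = some (hi, left + 2 ^ t, left + 2 ^ t + 2 ^ t - 1) := by
        simp only [pickA]; rw [if_neg (by omega), if_pos ⟨hb1, by omega⟩]
      rw [hpick]; dsimp only
      have harg : left + 2 ^ t + 2 ^ t - 1 = (left + 2 ^ t) + (2 : Int) ^ t - 1 := by ring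
      rw [harg, ih hi (res ++ [hi]) (left + 2 ^ t) k m hhi hb1 (by omega) (by omega)]
      simp only [suffixB, hfil]
      rw [if_pos (by rw [hcond]; omega)]
      simp

lemma loopA_empty (m : Int) (hm : 0 < m) (k : Int) (hk : k < 1 ∨ k > 3 * m) :
    ∀ t : Nat, loopA t [] "abc".toList 1 (3 * m) k = []
  | 0 => rfl
  | t + 1 => by
    have habc : "abc".toList = ['a', 'b', 'c'] := by decide
    have hps : PySem.Int.floordiv (3 * m - 1 + 1) ((0 + 1 + 1 + 1 : Nat) : Int) = m := by
      have h : 3 * m - 1 + 1 = m * 3 := by ring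
      rw [h, PySem.Int.floordiv_eq_ediv_of_pos (by norm_num)]
      norm_num
    have hpick : pickA ['a', 'b', 'c'] 1 m k = none := by
      simp only [pickA]
      rw [if_neg (by omega), if_neg (by omega), if_neg (by omega)]
    rw [habc]
    simp only [loopA, List.length_cons, List.length_nil]
    rw [hps, hpick]
    exact loopA_empty m hm k hk t

-- the three first-iteration blocks of A against B's first digit, stated after one unfolding of A's loop
lemma main_case1 (t : Nat) (k : Int) (hpos : (0 : Int) < 2 ^ t) (hk1 : 1 ≤ k)
    (hc : k < 1 + 2 ^ t) :
    (String.mk (match pickA ['a', 'b', 'c'] 1 (2 ^ t) k with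
      | some (c, l, r) => loopA t ([] ++ [c]) (PySem.Str.replace "abc" (String.mk [c]) "").toList l r k
      | none => loopA t [] ['a', 'b', 'c'] 1 (3 * 2 ^ t) k)) =
    String.mk
      ((if PySem.Int.floordiv (k - 1) (2 ^ t) = 0 then 'a'
        else if PySem.Int.floordiv (k - 1) (2 ^ t) = 1 then 'b' else 'c') ::
       suffixB
        (if PySem.Int.floordiv (k - 1) (2 ^ t) = 0 then 'a'
         else if PySem.Int.floordiv (k - 1) (2 ^ t) = 1 then 'b' else 'c')
        (k - 1) t) := by
  have hcast : ((2 ^ t : Nat) : Int) = 2 ^ t := by push_cast; ring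
  have hm : (((k - 1).toNat : Nat) : Int) = k - 1 := by omega
  have hmodn : (k - 1).toNat % 2 ^ t = (k - 1).toNat := Nat.mod_eq_of_lt (by omega)
  have hpick : pickA ['a', 'b', 'c'] 1 (2 ^ t) k = some ('a', 1, 1 + 2 ^ t - 1) := by
    simp only [pickA]; rw [if_pos ⟨by omega, by omega⟩]
  rw [hpick]; dsimp only [List.nil_append]
  rw [loopA_suffix t 'a' ['a'] 1 k (k - 1).toNat (by decide) (by omega) (by omega)
    (by rw [hmodn]; omega), hm]
  have hq : PySem.Int.floordiv (k - 1) (2 ^ t) = 0 := by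
    rw [PySem.Int.floordiv_eq_ediv_of_pos hpos]
    exact Int.ediv_eq_zero_of_lt (by omega) (by omega)
  rw [hq]
  simp

lemma main_case2 (t : Nat) (k : Int) (hpos : (0 : Int) < 2 ^ t) (hk1 : 1 + 2 ^ t ≤ k)
    (hc : k < 1 + 2 ^ t + 2 ^ t) :
    (String.mk (match pickA ['a', 'b', 'c'] 1 (2 ^ t) k with
      | some (c, l, r) => loopA t ([] ++ [c]) (PySem.Str.replace "abc" (String.mk [c]) "").toList l r k
      | none => loopA t [] ['a', 'b', 'c'] 1 (3 * 2 ^ t) k)) =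
    String.mk
      ((if PySem.Int.floordiv (k - 1) (2 ^ t) = 0 then 'a'
        else if PySem.Int.floordiv (k - 1) (2 ^ t) = 1 then 'b' else 'c') ::
       suffixB
        (if PySem.Int.floordiv (k - 1) (2 ^ t) = 0 then 'a'
         else if PySem.Int.floordiv (k - 1) (2 ^ t) = 1 then 'b' else 'c')
        (k - 1) t) := by
  have hcast : ((2 ^ t : Nat) : Int) = 2 ^ t := by push_cast; ring
  have hm : (((k - 1).toNat : Nat) : Int) = k - 1 := by omega
  have hmodn : (k - 1).toNat % 2 ^ t = (k - 1).toNat - 2 ^ t := by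
    rw [Nat.mod_eq_sub_mod (by omega)]
    exact Nat.mod_eq_of_lt (by omega)
  have hpick : pickA ['a', 'b', 'c'] 1 (2 ^ t) k
      = some ('b', 1 + 2 ^ t, 1 + 2 ^ t + 2 ^ t - 1) := by
    simp only [pickA]; rw [if_neg (by omega), if_pos ⟨by omega, by omega⟩]
  rw [hpick]; dsimp only [List.nil_append]
  have harg : 1 + 2 ^ t + 2 ^ t - 1 = (1 + 2 ^ t) + (2 : Int) ^ t - 1 := by ring
  rw [harg, loopA_suffix t 'b' ['b'] (1 + 2 ^ t) k (k - 1).toNat (by decide) (by omega)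
    (by omega) (by rw [hmodn, Nat.cast_sub (by omega), hm, hcast]; ring), hm]
  have hq : PySem.Int.floordiv (k - 1) (2 ^ t) = 1 := by
    rw [PySem.Int.floordiv_eq_ediv_of_pos hpos]
    have h : k - 1 = (k - 1 - 2 ^ t) + 1 * 2 ^ t := by ring
    rw [h, Int.add_mul_ediv_right _ _ (ne_of_gt hpos),
      Int.ediv_eq_zero_of_lt (by omega) (by omega)]
    omega
  rw [hq]
  simp

lemma main_case3 (t : Nat) (k : Int) (hpos : (0 : Int) < 2 ^ t) (hk1 : 1 + 2 ^ t + 2 ^ t ≤ k)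
    (hc : k < 1 + 2 ^ t + 2 ^ t + 2 ^ t) :
    (String.mk (match pickA ['a', 'b', 'c'] 1 (2 ^ t) k with
      | some (c, l, r) => loopA t ([] ++ [c]) (PySem.Str.replace "abc" (String.mk [c]) "").toList l r k
      | none => loopA t [] ['a', 'b', 'c'] 1 (3 * 2 ^ t) k)) =
    String.mk
      ((if PySem.Int.floordiv (k - 1) (2 ^ t) = 0 then 'a'
        else if PySem.Int.floordiv (k - 1) (2 ^ t) = 1 then 'b' else 'c') ::
       suffixB
        (if PySem.Int.floordiv (k - 1) (2 ^ t) = 0 then 'a'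
         else if PySem.Int.floordiv (k - 1) (2 ^ t) = 1 then 'b' else 'c')
        (k - 1) t) := by
  have hcast : ((2 ^ t : Nat) : Int) = 2 ^ t := by push_cast; ring
  have hm : (((k - 1).toNat : Nat) : Int) = k - 1 := by omega
  have hmodn : (k - 1).toNat % 2 ^ t = (k - 1).toNat - 2 ^ t - 2 ^ t := by
    rw [Nat.mod_eq_sub_mod (by omega), Nat.mod_eq_sub_mod (by omega)]
    exact Nat.mod_eq_of_lt (by omega)
  have hpick : pickA ['a', 'b', 'c'] 1 (2 ^ t) k
      = some ('c', 1 + 2 ^ t + 2 ^ t, 1 + 2 ^ t + 2 ^ t + 2 ^ t - 1) := by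
    simp only [pickA]; rw [if_neg (by omega), if_neg (by omega), if_pos ⟨by omega, by omega⟩]
  rw [hpick]; dsimp only [List.nil_append]
  have harg : 1 + 2 ^ t + 2 ^ t + 2 ^ t - 1 = (1 + 2 ^ t + 2 ^ t) + (2 : Int) ^ t - 1 := by ring
  rw [harg, loopA_suffix t 'c' ['c'] (1 + 2 ^ t + 2 ^ t) k (k - 1).toNat (by decide) (by omega)
    (by omega) (by rw [hmodn, Nat.cast_sub (by omega), Nat.cast_sub (by omega), hm, hcast]; ring),
    hm]
  have hq : PySem.Int.floordiv (k - 1) (2 ^ t) = 2 := by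
    rw [PySem.Int.floordiv_eq_ediv_of_pos hpos]
    have h : k - 1 = (k - 1 - 2 ^ t - 2 ^ t) + 2 * 2 ^ t := by ring
    rw [h, Int.add_mul_ediv_right _ _ (ne_of_gt hpos),
      Int.ediv_eq_zero_of_lt (by omega) (by omega)]
    omega
  rw [hq]
  simp

theorem getHappyString2_spec : Claim_equal_getHappyString2 := by
  unfold Claim_equal_getHappyString2 Spec_getHappyString2
  intro n k _
  by_cases hn : n < 1
  · have h0 : n.toNat = 0 := by omega
    unfold getHappyString2 getHappyString2_alt
    rw [h0, if_pos hn]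
    rfl
  · rw [not_lt] at hn
    have hnt : n.toNat = (n - 1).toNat + 1 := by omega
    have habc : "abc".toList = ['a', 'b', 'c'] := by decide
    unfold getHappyString2 getHappyString2_alt
    rw [hnt, if_neg (by omega)]
    generalize (n - 1).toNat = t
    have hpos : (0 : Int) < 2 ^ t := by positivity
    by_cases hk : k < 1 ∨ k > 3 * 2 ^ t
    · rw [if_pos hk, loopA_empty (2 ^ t) hpos k hk (t + 1)]
      rfl
    · rw [if_neg hk, habc]
      rw [not_or, not_lt, not_lt] at hk
      obtain ⟨hk1, hk2⟩ := hk
      have hps : PySem.Int.floordiv (3 * 2 ^ t - 1 + 1) ((0 + 1 + 1 + 1 : Nat) : Int)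
          = (2 : Int) ^ t := by
        have h : 3 * 2 ^ t - 1 + 1 = (2 : Int) ^ t * 3 := by ring
        rw [h, PySem.Int.floordiv_eq_ediv_of_pos (by norm_num)]
        norm_num
      simp only [loopA, List.length_cons, List.length_nil]
      rw [hps]
      rcases lt_trichotomy k (1 + 2 ^ t) with hc | hc | hc
      · exact main_case1 t k hpos hk1 hc
      · exact main_case2 t k hpos (by omega) (by omega)
      · rcases lt_trichotomy k (1 + 2 ^ t + 2 ^ t) with hd | hd | hd
        · exact main_case2 t k hpos (by omega) (by omega)
        · exact main_case3 t k hpos (by omega) (by omega)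
        · exact main_case3 t k hpos (by omega) (by omega)
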